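-- pv_equiv track=rewrite | github.com/lakehq/sail | python/pysail/utils/sort_compatibility_jsons.py | reorder_item
-- ===== SOURCE A (Python) =====
-- from typing import Final
--
-- EXPECTED_KEYS: Final[tuple[str]] = ("module", "function", "status")
--
-- def reorder_item(item: dict[str, str]) -> dict[str, str]:
--     """
--     reorder dictionary keys: module, function, status, then other keys alphabetically
--     """
--     ordered: dict[str, str] = {}
--     missing_keys = {ek for ek in EXPECTED_KEYS if ek not in item}
--     if missing_keys:
--         msg = f"JSON item {item} does not contain key(s): {missing_keys}"
--         raise KeyError(msg)
--     for k in EXPECTED_KEYS: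
--         ordered[k] = item[k]
--
--     # remaining keys
--     remaining = [k for k in item if k not in EXPECTED_KEYS]
--     for k in sorted(remaining):
--         ordered[k] = item[k]
--     return ordered
-- ===== SOURCE B (Python) =====
-- EXPECTED_KEYS = ("module", "function", "status")
--
--
-- def reorder_item(item: dict[str, str]) -> dict[str, str]:
--     """
--     reorder dictionary keys: module, function, status, then other keys alphabetically
--     """
--     missing_keys = {ek for ek in EXPECTED_KEYS if ek not in item}
--     if missing_keys:
--         msg = f"JSON item {item} does not contain key(s): {missing_keys}"
--         raise KeyError(msg)
--     # one composite-key sort: expected keys rank by position (as a digit prefix),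
--     # all other keys share the past-the-end rank and tie-break alphabetically
--     rank = {k: str(i) for i, k in enumerate(EXPECTED_KEYS)}
--     tail = str(len(EXPECTED_KEYS))
--     return {k: item[k] for k in sorted(item, key=lambda k: rank.get(k, tail) + k)}
-- ===== Notes on version B (the rewrite author's own statement) =====
-- stated objective: idiomatic
-- what changed: A builds the result in two passes (copy the fixed EXPECTED_KEYS prefix, then a second loop over the sorted remaining keys); B computes one composite sort key (rank-digit prefix + key) and builds the result in a single sorted comprehension over all keys.
import Mathlib
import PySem

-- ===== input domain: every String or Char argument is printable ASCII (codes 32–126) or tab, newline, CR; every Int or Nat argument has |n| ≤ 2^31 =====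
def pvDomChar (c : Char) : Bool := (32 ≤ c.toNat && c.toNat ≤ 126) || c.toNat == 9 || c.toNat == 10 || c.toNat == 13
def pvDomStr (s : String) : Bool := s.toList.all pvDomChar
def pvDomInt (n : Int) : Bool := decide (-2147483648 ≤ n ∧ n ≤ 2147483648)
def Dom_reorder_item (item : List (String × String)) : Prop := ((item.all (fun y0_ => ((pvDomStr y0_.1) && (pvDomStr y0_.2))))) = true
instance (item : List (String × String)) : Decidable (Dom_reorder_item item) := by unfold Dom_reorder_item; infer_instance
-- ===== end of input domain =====

-- B replaces A's two result-building passes (fixed prefix, then sorted remainder) by one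
-- composite-key sort (rank-digit prefix + key) feeding a single comprehension (idiomatic).

-- ===== PORT A =====
def pvExpectedKeys : List String := ["module", "function", "status"]

-- Literal port of A. The missing-key check raises KeyError: those inputs are outside
-- Pre_reorder_item, so item[k] (always present there) is ported as Dict.getD.
def reorder_item (item : List (String × String)) : List (String × String) :=
  let d : PySem.Dict String String := PySem.Dict.mk item
  let ordered : PySem.Dict String String :=
    pvExpectedKeys.foldl (fun o k => o.insert k (d.getD k "")) (PySem.Dict.mk [])
  let remaining : List String := d.keys.filter (fun k => !(pvExpectedKeys.contains k))
  ((PySem.List.sorted remaining (fun k => k) false).foldl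
      (fun o k => o.insert k (d.getD k "")) ordered).items

-- ===== PORT B =====
-- rank = {k: str(i) for i, k in enumerate(EXPECTED_KEYS)}
def pvRank : PySem.Dict String String :=
  (PySem.List.enumerate pvExpectedKeys 0).foldl
    (fun r p => r.insert p.2 (PySem.Int.toStr p.1)) (PySem.Dict.mk [])

-- tail = str(len(EXPECTED_KEYS))
def pvTail : String := PySem.Int.toStr (pvExpectedKeys.length : Int)

-- lambda k: rank.get(k, tail) + k   (string '+' ported exactly via toList/ofList)
def pvKey (k : String) : String :=
  String.ofList ((pvRank.getD k pvTail).toList ++ k.toList)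

def reorder_item_alt (item : List (String × String)) : List (String × String) :=
  let d : PySem.Dict String String := PySem.Dict.mk item
  ((PySem.List.sorted d.keys pvKey false).foldl
      (fun o k => o.insert k (d.getD k "")) (PySem.Dict.mk [])).items

-- ===== PRECONDITION & SPEC =====
-- Pre_ excludes (a) inputs missing one of EXPECTED_KEYS, on which A raises KeyError, and
-- (b) association lists with duplicate keys, which do not represent a Python dict
-- (dict arguments decode to lists of distinct keys).
def Pre_reorder_item (item : List (String × String)) : Prop :=
  (∀ ek ∈ pvExpectedKeys, ek ∈ item.map Prod.fst) ∧ (item.map Prod.fst).Nodup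
instance (item : List (String × String)) : Decidable (Pre_reorder_item item) := by
  unfold Pre_reorder_item; infer_instance

def pvWitness_reorder_item : (List (String × String)) :=
  [("module", "a"), ("function", "b"), ("status", "c"), ("zeta", "1"), ("alpha", "2")]

def Spec_reorder_item (item : List (String × String)) (out : List (String × String)) : Prop := out = reorder_item_alt item
instance (item : List (String × String)) (out : List (String × String)) : Decidable (Spec_reorder_item item out) := by unfold Spec_reorder_item; infer_instance

-- ===== CLAIM (what is proved, stated in full; the proofs are below) =====
def Claim_equal_reorder_item : Prop := ∀ (item : List (String × String)), Dom_reorder_item item → Pre_reorder_item item → Spec_reorder_item item (reorder_item item)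

-- ===== LEMMAS AND PROOFS =====

-- Outside EXPECTED_KEYS the rank lookup misses and returns the tail rank "3".
lemma rank_getD_not_mem (k : String) (h : k ∉ pvExpectedKeys) : pvRank.getD k pvTail = "3" := by
  simp [pvExpectedKeys] at h
  obtain ⟨h1, h2, h3⟩ := h
  have e1 : pvRank = PySem.Dict.mk [("module","0"),("function","1"),("status","2")] := rfl
  have e2 : pvTail = "3" := rfl
  rw [e1, e2]
  simp [PySem.Dict.getD, PySem.Dict.get?, Ne.symm h1, Ne.symm h2, Ne.symm h3]

-- An expected key's composite key ('0'/'1'/'2' prefix) precedes every tail key ('3' prefix).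
lemma pvKey_lt_of_mem_not_mem (e r : String) (he : e ∈ pvExpectedKeys) (hr : r ∉ pvExpectedKeys) :
    pvKey e < pvKey r := by
  rw [String.lt_iff_toList_lt]
  simp only [pvKey, String.toList_ofList, rank_getD_not_mem r hr]
  fin_cases he <;> exact List.Lex.rel (by decide)

-- On tail keys the composite key is strictly monotone (shared '3' prefix, then the key itself).
lemma pvKey_lt_tail (r1 r2 : String) (h1 : r1 ∉ pvExpectedKeys) (h2 : r2 ∉ pvExpectedKeys)
    (h : r1 < r2) : pvKey r1 < pvKey r2 := by
  rw [String.lt_iff_toList_lt] at h ⊢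
  simp only [pvKey, String.toList_ofList, rank_getD_not_mem r1 h1, rank_getD_not_mem r2 h2]
  exact List.Lex.cons h

-- The three expected keys are strictly increasing under the composite key.
lemma pvKey_pairwise_expected : pvExpectedKeys.Pairwise (fun a b => pvKey a < pvKey b) := by
  refine List.Pairwise.cons ?_ (List.Pairwise.cons ?_ (List.Pairwise.cons ?_ List.Pairwise.nil))
  all_goals intro b hb
  all_goals simp at hb
  · rcases hb with rfl | rfl <;> (rw [String.lt_iff_toList_lt]; simp only [pvKey, String.toList_ofList]; exact List.Lex.rel (by decide))
  · subst hb; rw [String.lt_iff_toList_lt]; simp only [pvKey, String.toList_ofList]; exact List.Lex.rel (by decide)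

-- B's single composite-key sort produces exactly A's key order: EXPECTED_KEYS, then the
-- remaining keys alphabetically.
theorem sorted_pvKey_eq (item : List (String × String))
    (hpre : (∀ ek ∈ pvExpectedKeys, ek ∈ item.map Prod.fst) ∧ (item.map Prod.fst).Nodup) :
    PySem.List.sorted ((PySem.Dict.mk item).keys) pvKey false
      = pvExpectedKeys ++ PySem.List.sorted (((PySem.Dict.mk item).keys).filter (fun k => !(pvExpectedKeys.contains k))) (fun k => k) false := by
  obtain ⟨hsub, hnd⟩ := hpre
  have hks : (PySem.Dict.mk item).keys = item.map Prod.fst := by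
    simp [PySem.Dict.keys]
  rw [hks]
  set ks := item.map Prod.fst with hksdef
  set rem := ks.filter (fun k => !(pvExpectedKeys.contains k)) with hrem
  set srem := PySem.List.sorted rem (fun k => k) false with hsrem
  have hremnd : rem.Nodup := hnd.filter _
  have hsremperm : srem.Perm rem := PySem.List.sorted_perm rem (fun k => k) false
  have hsremnd : srem.Nodup := hsremperm.symm.nodup hremnd
  have hsremnotmem : ∀ r ∈ srem, r ∉ pvExpectedKeys := by
    intro r hr
    have : r ∈ rem := hsremperm.mem_iff.mp hr
    have := List.of_mem_filter this
    simpa using this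
  have hfilperm : (ks.filter (fun k => pvExpectedKeys.contains k) ++ rem).Perm ks :=
    List.filter_append_perm (fun k => pvExpectedKeys.contains k) ks
  have hfe : pvExpectedKeys.Perm (ks.filter (fun k => pvExpectedKeys.contains k)) := by
    refine (List.perm_ext_iff_of_nodup (by decide) (hnd.filter _)).mpr ?_
    intro a
    simp only [List.mem_filter, List.contains_eq_mem, decide_eq_true_eq]
    constructor
    · intro ha; exact ⟨hsub a ha, ha⟩
    · intro ha; exact ha.2
  have hperm : (pvExpectedKeys ++ srem).Perm ks :=
    ((hfe.append hsremperm).trans hfilperm)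
  have hpw : (pvExpectedKeys ++ srem).Pairwise (fun a b => pvKey a < pvKey b) := by
    rw [List.pairwise_append]
    refine ⟨pvKey_pairwise_expected, ?_, ?_⟩
    · have hle : srem.Pairwise (fun a b => a ≤ b) := by
        simpa using PySem.List.sorted_pairwise rem (fun k => k)
      have hne : srem.Pairwise (fun a b : String => a ≠ b) := hsremnd
      refine ((hle.and hne).imp_of_mem ?_)
      intro a b ha hb hab
      exact pvKey_lt_tail a b (hsremnotmem a ha) (hsremnotmem b hb) (lt_of_le_of_ne hab.1 hab.2)
    · intro e he r hr
      exact pvKey_lt_of_mem_not_mem e r he (hsremnotmem r hr)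
  exact PySem.List.sorted_eq_of_perm_of_pairwise_lt ks (pvExpectedKeys ++ srem) pvKey hperm hpw

-- ===== VERDICT (by name: the statement is the Claim_ definition above) =====
theorem reorder_item_spec : Claim_equal_reorder_item := by
  intro item _hdom hpre
  unfold Spec_reorder_item
  have hmain := sorted_pvKey_eq item hpre
  show ((PySem.List.sorted (((PySem.Dict.mk item).keys).filter (fun k => !(pvExpectedKeys.contains k))) (fun k => k) false).foldl
      (fun o k => o.insert k ((PySem.Dict.mk item).getD k ""))
      (pvExpectedKeys.foldl (fun o k => o.insert k ((PySem.Dict.mk item).getD k "")) (PySem.Dict.mk []))).items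
    = ((PySem.List.sorted ((PySem.Dict.mk item).keys) pvKey false).foldl
      (fun o k => o.insert k ((PySem.Dict.mk item).getD k "")) (PySem.Dict.mk [])).items
  rw [← List.foldl_append, hmain]
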